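-- pv_equiv track=rewrite | github.com/yair040/AI_Course_Ramat_Gan- | Lesson30_BST/Lesson30_BalancedTokenTree/balanced_token_tree/balancing.py | create_balanced_pairs
-- ===== SOURCE A (Python) =====
-- from typing import List, Tuple, Dict, Any
--
-- def create_balanced_pairs(sorted_tokens: List[int]) -> List[Tuple[int, int]]:
--     """
--     Create balanced pairs by matching smallest with largest values.
--
--     This algorithm pairs extremes to minimize variance in parent node sums.
--
--     Args:
--         sorted_tokens: Sorted list of token values
--
--     Returns:
--         List of (small, large) token pairs
--
--     Example:
--         [100, 200, 300, 400] -> [(100, 400), (200, 300)]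
--     """
--     tokens = sorted_tokens.copy()
--     pairs = []
--
--     while len(tokens) >= 2:
--         smallest = tokens.pop(0)  # Remove first (smallest)
--         largest = tokens.pop()     # Remove last (largest)
--         pairs.append((smallest, largest))
--
--     return pairs
-- ===== SOURCE B (Python) =====
-- from typing import List, Tuple
--
-- def create_balanced_pairs(sorted_tokens: List[int]) -> List[Tuple[int, int]]:
--     # Zip the list with its reverse and keep the first half: O(n), no pop(0).
--     return list(zip(sorted_tokens, reversed(sorted_tokens)))[:len(sorted_tokens) // 2]
-- ===== Notes on version B (the rewrite author's own statement) =====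
-- stated objective: faster
-- what changed: Replaces the destructive while-loop that repeatedly pops the first element (an O(n) shift each time) with a single zip of the list against its reverse, truncated to the first half.
import Mathlib
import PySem

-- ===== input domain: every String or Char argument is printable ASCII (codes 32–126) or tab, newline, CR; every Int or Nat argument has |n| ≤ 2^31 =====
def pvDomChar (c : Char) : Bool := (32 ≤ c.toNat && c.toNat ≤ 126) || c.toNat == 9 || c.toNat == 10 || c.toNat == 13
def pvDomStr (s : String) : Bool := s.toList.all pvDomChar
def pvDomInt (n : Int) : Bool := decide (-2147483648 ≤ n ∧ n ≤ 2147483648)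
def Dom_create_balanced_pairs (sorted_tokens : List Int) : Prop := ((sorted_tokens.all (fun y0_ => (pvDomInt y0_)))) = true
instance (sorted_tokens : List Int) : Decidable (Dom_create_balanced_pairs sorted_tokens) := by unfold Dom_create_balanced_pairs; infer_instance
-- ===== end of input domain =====

-- B replaces A's quadratic pop(0) loop by one zip of the list with its reverse, truncated to the first half (faster: asymptotic).

-- ===== PORT A =====
-- the while-loop: pop first, pop last, append the pair
def cbpLoop (tokens : List Int) (pairs : List (Int × Int)) : List (Int × Int) :=
  if h : 2 ≤ tokens.length then
    have hne : tokens ≠ [] := by cases tokens <;> simp_all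
    have htne : tokens.tail ≠ [] := by
      cases tokens with
      | nil => simp at hne
      | cons a t => cases t <;> simp_all
    let smallest := tokens.head hne
    let largest := tokens.tail.getLast htne
    cbpLoop tokens.tail.dropLast (pairs ++ [(smallest, largest)])
  else pairs
termination_by tokens.length
decreasing_by
  simp [List.length_dropLast, List.length_tail]; omega

def create_balanced_pairs (sorted_tokens : List Int) : List (Int × Int) :=
  cbpLoop sorted_tokens []

-- ===== PORT B =====
def create_balanced_pairs_alt (sorted_tokens : List Int) : List (Int × Int) :=
  (sorted_tokens.zip sorted_tokens.reverse).take (sorted_tokens.length / 2)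

-- ===== PRECONDITION & SPEC =====
def Spec_create_balanced_pairs (sorted_tokens : List Int) (out : List (Int × Int)) : Prop := out = create_balanced_pairs_alt sorted_tokens
instance (sorted_tokens : List Int) (out : List (Int × Int)) : Decidable (Spec_create_balanced_pairs sorted_tokens out) := by unfold Spec_create_balanced_pairs; infer_instance

-- ===== CLAIM (what is proved, stated in full; the proofs are below) =====
def Claim_equal_create_balanced_pairs : Prop := ∀ (sorted_tokens : List Int), Dom_create_balanced_pairs sorted_tokens → Spec_create_balanced_pairs sorted_tokens (create_balanced_pairs sorted_tokens)

-- ===== LEMMAS AND PROOFS =====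

-- peeling the outermost pair of the zip-with-reverse presentation
lemma zip_rev_take_cons (x z : Int) (m : List Int) :
    ((x :: (m ++ [z])).zip (x :: (m ++ [z])).reverse).take ((m.length + 2) / 2)
      = (x, z) :: (m.zip m.reverse).take (m.length / 2) := by
  have hrev : (x :: (m ++ [z])).reverse = z :: (m.reverse ++ [x]) := by
    simp
  rw [hrev]
  have hzip : (m ++ [z]).zip (m.reverse ++ [x]) = m.zip m.reverse ++ [(z, x)] := by
    rw [List.zip_append (by simp)]
    simp
  have hdiv : (m.length + 2) / 2 = m.length / 2 + 1 := by omega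
  rw [List.zip_cons_cons, hdiv, List.take_succ_cons, hzip,
      List.take_append_of_le_length (by simp; omega)]

lemma cbpLoop_eq (tokens : List Int) (pairs : List (Int × Int)) :
    cbpLoop tokens pairs
      = pairs ++ (tokens.zip tokens.reverse).take (tokens.length / 2) := by
  induction tokens, pairs using cbpLoop.induct with
  | case1 tokens pairs h hne htne _s _l ih =>
    rw [cbpLoop, dif_pos h]
    rw [ih]
    -- decompose tokens = head :: (dropLast tail ++ [last tail])
    obtain ⟨x, t, rfl⟩ : ∃ x t, tokens = x :: t := by
      cases tokens with
      | nil => simp at hne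
      | cons a t => exact ⟨a, t, rfl⟩
    simp only [List.tail_cons]
    have hdecomp : t = t.dropLast ++ [t.getLast (by simpa using htne)] :=
      (List.dropLast_append_getLast _).symm
    conv_rhs => rw [hdecomp]
    have hlen : (x :: (t.dropLast ++ [t.getLast (by simpa using htne)])).length
        = t.dropLast.length + 2 := by simp
    rw [hlen, zip_rev_take_cons x _ t.dropLast]
    simp [_s, _l]
    exact List.getLast_cons (by simpa using htne)
  | case2 tokens pairs h =>
    rw [cbpLoop, dif_neg h]
    have h0 : tokens.length / 2 = 0 := by omega
    simp [h0]

-- ===== VERDICT (by name: the statement is the Claim_ definition above) =====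
theorem create_balanced_pairs_spec : Claim_equal_create_balanced_pairs := by
  intro xs _
  unfold Spec_create_balanced_pairs create_balanced_pairs create_balanced_pairs_alt
  simpa using cbpLoop_eq xs []
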